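-- pv_equiv track=rewrite | github.com/DerDodo/AdventOfCode2015 | solutions/level11.py | clean_password
-- ===== SOURCE A (Python) =====
-- def clean_password(text: str) -> str:
--     new_text = ""
--     fill_a = False
--     for character in text:
--         if fill_a:
--             new_text += "a"
--         elif character == "i":
--             new_text += "j"
--             fill_a = True
--         elif character == "o":
--             new_text += "p"
--             fill_a = True
--         elif character == "l":
--             new_text += "m"
--             fill_a = True
--         else:
--             new_text += character
--
--     return new_text
-- ===== SOURCE B (Python) =====
-- def clean_password(text: str) -> str:
--     for i, c in enumerate(text):
--         if c in "iol":
--             return text[:i] + {"i": "j", "o": "p", "l": "m"}[c] + "a" * (len(text) - i - 1)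
--     return text
-- ===== Notes on version B (the rewrite author's own statement) =====
-- stated objective: simpler
-- what changed: Instead of a per-character accumulator loop with a fill_a flag, B finds the first i/o/l, returns the text unchanged if none, and otherwise builds prefix + mapped char + 'a'*(rest) by slicing and string repetition.
import Mathlib
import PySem

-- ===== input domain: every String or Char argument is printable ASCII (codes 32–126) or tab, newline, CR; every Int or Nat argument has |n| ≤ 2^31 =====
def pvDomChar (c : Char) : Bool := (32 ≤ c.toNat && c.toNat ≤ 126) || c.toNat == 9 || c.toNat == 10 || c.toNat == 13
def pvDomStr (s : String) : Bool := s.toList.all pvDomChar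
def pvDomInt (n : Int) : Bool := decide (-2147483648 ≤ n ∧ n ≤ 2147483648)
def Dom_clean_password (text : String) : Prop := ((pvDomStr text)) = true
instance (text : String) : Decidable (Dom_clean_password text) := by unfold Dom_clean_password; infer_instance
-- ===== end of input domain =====

-- B replaces A's per-character accumulator loop (with a fill_a flag) by: find the first
-- i/o/l, return text unchanged if none, else prefix + mapped char + 'a'-repetition (simpler).


-- ===== PORT A =====
-- the loop of A: state is the fill_a flag; each character appends one character
def cleanAGo : List Char → Bool → List Char
  | [], _ => []
  | c :: rest, fill =>
    if fill then 'a' :: cleanAGo rest true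
    else if c = 'i' then 'j' :: cleanAGo rest true
    else if c = 'o' then 'p' :: cleanAGo rest true
    else if c = 'l' then 'm' :: cleanAGo rest true
    else c :: cleanAGo rest false

def clean_password (text : String) : String := String.mk (cleanAGo text.toList false)

-- ===== PORT B =====
-- B's loop: 'for i, c in enumerate(text): if c in "iol": return …'
def findBad : List Char → Nat → Option (Nat × Char)
  | [], _ => none
  | c :: rest, i =>
    if c = 'i' ∨ c = 'o' ∨ c = 'l' then some (i, c) else findBad rest (i + 1)

-- the dict {"i": "j", "o": "p", "l": "m"} lookup
def mapBad (c : Char) : Char := if c = 'i' then 'j' else if c = 'o' then 'p' else 'm'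

def clean_password_alt (text : String) : String :=
  match findBad text.toList 0 with
  | none => text
  | some (i, c) =>
      String.mk (text.toList.take i ++ [mapBad c] ++ List.replicate (text.toList.length - i - 1) 'a')

-- ===== PRECONDITION & SPEC =====
def Spec_clean_password (text : String) (out : String) : Prop := out = clean_password_alt text
instance (text : String) (out : String) : Decidable (Spec_clean_password text out) := by unfold Spec_clean_password; infer_instance

-- ===== CLAIM (what is proved, stated in full; the proofs are below) =====
def Claim_equal_clean_password : Prop := ∀ (text : String), Dom_clean_password text → Spec_clean_password text (clean_password text)

-- ===== LEMMAS AND PROOFS =====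
theorem cleanAGo_true (cs : List Char) : cleanAGo cs true = List.replicate cs.length 'a' := by
  induction cs with
  | nil => rfl
  | cons c rest ih => simp [cleanAGo, ih, List.replicate]

theorem findBad_shift (cs : List Char) (i : Nat) :
    findBad cs i = (findBad cs 0).map (fun p => (p.1 + i, p.2)) := by
  induction cs generalizing i with
  | nil => rfl
  | cons c rest ih =>
    by_cases h : c = 'i' ∨ c = 'o' ∨ c = 'l'
    · simp [findBad, h]
    · simp only [findBad, if_neg h]
      rw [ih (i + 1), ih 1, Option.map_map]
      rcases findBad rest 0 with _ | p <;> simp <;> omega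

theorem cleanAGo_eq (cs : List Char) :
    cleanAGo cs false =
      match findBad cs 0 with
      | none => cs
      | some (i, c) => cs.take i ++ [mapBad c] ++ List.replicate (cs.length - i - 1) 'a' := by
  induction cs with
  | nil => rfl
  | cons c rest ih =>
    by_cases h : c = 'i' ∨ c = 'o' ∨ c = 'l'
    · have : cleanAGo (c :: rest) false = mapBad c :: cleanAGo rest true := by
        rcases h with h | h | h <;> simp [cleanAGo, mapBad, h]
      rw [this, cleanAGo_true]
      simp [findBad, h]
    · simp only [findBad, if_neg h]
      rw [findBad_shift rest 1]
      have hstep : cleanAGo (c :: rest) false = c :: cleanAGo rest false := by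
        push_neg at h
        simp [cleanAGo, h.1, h.2.1, h.2.2]
      rw [hstep, ih]
      rcases hf : findBad rest 0 with _ | ⟨j, d⟩
      · simp [hf]
      · simp only [hf, Option.map_some]
        have hlen : rest.length + 1 - (j + 1) - 1 = rest.length - j - 1 := by omega
        simp [List.take_succ_cons, hlen]

-- ===== VERDICT (by name: the statement is the Claim_ definition above) =====
theorem clean_password_spec : Claim_equal_clean_password := by
  intro text _
  unfold Spec_clean_password clean_password clean_password_alt
  rw [cleanAGo_eq]
  cases hf : findBad text.toList 0 with
  | none => exact String.ofList_toList
  | some p => rfl
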